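-- pv_equiv track=rewrite | github.com/j02on/Algorithm | 프로그래머스/2/138476. 귤 고르기/귤 고르기.py | solution
-- ===== SOURCE A (Python) =====
-- from collections import Counter
--
-- def solution(k, tangerine):
--     answer = 0
--
--     counts = Counter(tangerine)
--
--     countArr = sorted(counts.values(), reverse=True)
--
--     for i in countArr :
--         if k <= 0 :
--             break;
--
--         k -= i
--         answer = answer + 1
--
--     return answer
-- ===== SOURCE B (Python) =====
-- from collections import Counter
--
-- def solution(k, tangerine):
--     counts = Counter(tangerine)
--     vals = counts.values()
--     if not vals:
--         return 0
--     maxc = max(vals)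
--     freq = Counter(vals)  # freq[v] = number of sizes occurring exactly v times
--     answer = 0
--     # scan bucket values from the largest count down (counting-sort order, no comparison sort)
--     for v in range(maxc, 0, -1):
--         for _ in range(freq[v]):
--             if k <= 0:
--                 return answer
--             k -= v
--             answer += 1
--     return answer
-- ===== Notes on version B (the rewrite author's own statement) =====
-- stated objective: alternative
-- what changed: Replaces the comparison sort of the per-size counts by a counting-sort bucket scan: a Counter of the counts is scanned from the maximal count value down to 1, consuming each bucket greedily.
import Mathlib
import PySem

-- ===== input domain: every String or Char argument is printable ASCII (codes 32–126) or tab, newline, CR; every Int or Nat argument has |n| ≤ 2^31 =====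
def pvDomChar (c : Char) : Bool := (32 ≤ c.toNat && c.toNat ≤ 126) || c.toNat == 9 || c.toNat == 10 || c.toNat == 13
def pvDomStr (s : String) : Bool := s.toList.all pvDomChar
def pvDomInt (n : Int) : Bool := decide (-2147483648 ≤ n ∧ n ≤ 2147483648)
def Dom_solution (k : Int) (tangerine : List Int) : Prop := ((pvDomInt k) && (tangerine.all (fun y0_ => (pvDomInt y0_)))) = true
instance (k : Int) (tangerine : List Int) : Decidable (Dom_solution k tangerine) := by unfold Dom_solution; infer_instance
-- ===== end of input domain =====

-- B replaces A's comparison sort of the per-size counts by a counting-sort bucket scan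
-- (Counter of the counts, scanned from the maximal count down); same value everywhere.

-- ===== PORT A =====
-- Counter(tangerine); sorted(counts.values(), reverse=True); greedy loop with break
def solution (k : Int) (tangerine : List Int) : Int :=
  let counts := PySem.Dict.counter tangerine
  let countArr := PySem.List.sorted counts.values (fun x => x) true
  (countArr.foldl (fun (s : Int × Int) i => if s.1 ≤ 0 then s else (s.1 - i, s.2 + 1))
    (k, 0)).2

-- ===== PORT B =====
-- counts = Counter(tangerine); vals = counts.values(); if not vals: 0;
-- maxc = max(vals) (running max, PySem.List.max?_id_cons); freq = Counter(vals);
-- nested loops: for v in range(maxc, 0, -1): for _ in range(freq[v]): greedy body with early return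
def solution_alt (k : Int) (tangerine : List Int) : Int :=
  let counts := PySem.Dict.counter tangerine
  match counts.values with
  | [] => 0
  | x :: t =>
    let maxc := t.foldl max x
    let freq := PySem.Dict.counter (x :: t)
    ((PySem.List.pyRange maxc 0 (-1)).foldl
      (fun (s : Int × Int) v =>
        (PySem.List.pyRange 0 (freq.getD v 0) 1).foldl
          (fun s _ => if s.1 ≤ 0 then s else (s.1 - v, s.2 + 1)) s)
      (k, 0)).2

-- ===== PRECONDITION & SPEC =====
def Spec_solution (k : Int) (tangerine : List Int) (out : Int) : Prop := out = solution_alt k tangerine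
instance (k : Int) (tangerine : List Int) (out : Int) : Decidable (Spec_solution k tangerine out) := by unfold Spec_solution; infer_instance

-- ===== CLAIM (what is proved, stated in full; the proofs are below) =====
def Claim_equal_solution : Prop := ∀ (k : Int) (tangerine : List Int), Dom_solution k tangerine → Spec_solution k tangerine (solution k tangerine)

-- ===== LEMMAS AND PROOFS =====

-- a loop that ignores its element is function iteration
theorem pvFoldlIgnore {α σ : Type} (l : List α) (g : σ → σ) (s : σ) :
    l.foldl (fun s _ => g s) s = g^[l.length] s := by
  induction l generalizing s with
  | nil => rfl
  | cons a t ih => simp [List.foldl_cons, ih, Function.iterate_succ_apply]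

-- a fold over a replicate is the same iteration
theorem pvFoldlReplicate {α σ : Type} (n : Nat) (v : α) (f : σ → α → σ) (s : σ) :
    (List.replicate n v).foldl f s = (fun s => f s v)^[n] s := by
  induction n generalizing s with
  | zero => rfl
  | succ m ih => simp [List.replicate_succ, List.foldl_cons, ih, Function.iterate_succ_apply]

-- 'for _ in range(n): body(v)' is a fold over replicate n.toNat v
theorem pvInnerLoop {σ : Type} (n : Int) (v : Int) (f : σ → Int → σ) (s : σ) :
    (PySem.List.pyRange 0 n 1).foldl (fun s _ => f s v) s
      = (List.replicate n.toNat v).foldl f s := by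
  rw [pvFoldlIgnore, pvFoldlReplicate, PySem.List.length_pyRange_one]
  norm_num

-- nested loop = single fold over the flattened bucket list
theorem pvFoldlFlatMap {α β σ : Type} (l : List α) (g : α → List β) (f : σ → β → σ) (s : σ) :
    (l.flatMap g).foldl f s = l.foldl (fun s v => (g v).foldl f s) s := by
  induction l generalizing s with
  | nil => rfl
  | cons a t ih => simp [List.flatMap_cons, List.foldl_append, ih]

-- sum of a one-hot map over a nodup list
theorem pvSumOneHot (l : List Int) (hl : l.Nodup) (c : Int → Nat) (w : Int) :
    (l.map (fun v => if v = w then c v else 0)).sum = if w ∈ l then c w else 0 := by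
  induction l with
  | nil => simp
  | cons a t ih =>
    simp only [List.map_cons, List.sum_cons, List.mem_cons]
    rcases List.nodup_cons.mp hl with ⟨ha, ht⟩
    by_cases hw : a = w
    · subst hw
      simp [ha, ih ht]
    · simp only [hw, if_false, Nat.zero_add, ih ht]
      by_cases hm : w ∈ t <;> simp [hm, Ne.symm hw]

-- the countdown range is strictly decreasing and nodup
theorem pvDescPairwise (a b : Int) :
    (PySem.List.pyRange a b (-1)).Pairwise (fun x y => y < x) := by
  rw [PySem.List.pyRange_neg_one_eq_reverse]
  exact (List.pairwise_reverse).mpr (PySem.List.pairwise_lt_pyRange_one _ _)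

theorem pvDescNodup (a b : Int) : (PySem.List.pyRange a b (-1)).Nodup := by
  rw [PySem.List.pyRange_neg_one_eq_reverse]
  exact List.nodup_reverse.mpr (PySem.List.nodup_pyRange_one _ _)

-- the bucket list (all values of vals, from maxc down, each repeated its multiplicity)
def pvBucket (vals : List Int) (maxc : Int) : List Int :=
  (PySem.List.pyRange maxc 0 (-1)).flatMap (fun v => List.replicate (vals.count v) v)

theorem pvBucketPerm (vals : List Int) (maxc : Int)
    (hb : ∀ v ∈ vals, 1 ≤ v ∧ v ≤ maxc) : (pvBucket vals maxc).Perm vals := by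
  rw [List.perm_iff_count]
  intro w
  rw [pvBucket, List.count_flatMap]
  simp only [Function.comp_def]
  have h1 : ((PySem.List.pyRange maxc 0 (-1)).map
        fun v => List.count w (List.replicate (vals.count v) v)).sum
      = ((PySem.List.pyRange maxc 0 (-1)).map
        fun v => if v = w then vals.count v else 0).sum := by
    refine congrArg List.sum (List.map_congr_left ?_)
    intro v _
    rw [List.count_replicate]
    simp [beq_iff_eq]
  rw [h1, pvSumOneHot _ (pvDescNodup maxc 0) _ w]
  by_cases hw : w ∈ vals
  · have := hb w hw
    rw [if_pos (PySem.List.mem_pyRange_neg_one.mpr ⟨by omega, this.2⟩)]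
  · rw [List.count_eq_zero.mpr hw]
    split <;> rfl

theorem pvBucketPairwise (vals : List Int) (maxc : Int) :
    (pvBucket vals maxc).Pairwise (fun x y => y ≤ x) := by
  rw [pvBucket, List.flatMap_def]
  refine List.pairwise_flatten.mpr ⟨?_, ?_⟩
  · intro l hl
    rcases List.mem_map.mp hl with ⟨v, _, rfl⟩
    exact List.pairwise_replicate.mpr (Or.inr le_rfl)
  · rw [List.pairwise_map]
    refine (pvDescPairwise maxc 0).imp ?_
    intro a b hba x hx y hy
    rw [List.eq_of_mem_replicate hx, List.eq_of_mem_replicate hy]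
    exact le_of_lt hba

-- the bucket list IS sorted(vals, reverse=True)
theorem pvBucketEqSorted (vals : List Int) (maxc : Int)
    (hb : ∀ v ∈ vals, 1 ≤ v ∧ v ≤ maxc) :
    PySem.List.sorted vals (fun x => x) true = pvBucket vals maxc := by
  refine List.Perm.eq_of_pairwise (le := fun x y => y ≤ x)
    (fun a b _ _ h1 h2 => le_antisymm h2 h1)
    (PySem.List.sorted_pairwise_rev (xs := vals) (key := fun x => x))
    (pvBucketPairwise vals maxc)
    ((PySem.List.sorted_perm vals (fun x => x) true).trans (pvBucketPerm vals maxc hb).symm)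

-- counter values are the multiplicities of the distinct elements
theorem pvValuesPos (tangerine : List Int) :
    ∀ v ∈ (PySem.Dict.counter tangerine).values, 1 ≤ v := by
  intro v hv
  rw [PySem.Dict.values_eq_map_keys _ (PySem.Dict.nodup_keys_counter tangerine) 0] at hv
  rcases List.mem_map.mp hv with ⟨key, hk, rfl⟩
  rw [PySem.Dict.keys_counter] at hk
  have hmem : key ∈ tangerine := (PySem.Set.mem_ofList tangerine key).mp hk
  rw [PySem.Dict.getD_counter]
  have : 0 < tangerine.count key := List.count_pos_iff.mpr hmem
  omega

-- ===== VERDICT (by name: the statement is the Claim_ definition above) =====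
theorem solution_spec : Claim_equal_solution := by
  intro k tangerine _
  show solution k tangerine = solution_alt k tangerine
  simp only [solution, solution_alt]
  cases h : (PySem.Dict.counter tangerine).values with
  | nil =>
    rw [show PySem.List.sorted ([] : List Int) (fun x => x) true = [] from rfl]
    rfl
  | cons x t =>
    have hpos : ∀ v ∈ x :: t, 1 ≤ v := by
      intro v hv; exact pvValuesPos tangerine v (h ▸ hv)
    have hmax : ∀ v ∈ x :: t, v ≤ t.foldl max x := by
      intro v hv
      rcases List.mem_cons.mp hv with rfl | hv
      · exact (PySem.List.le_foldl_max t v).1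
      · exact (PySem.List.le_foldl_max t x).2 v hv
    have hb : ∀ v ∈ x :: t, 1 ≤ v ∧ v ≤ t.foldl max x := fun v hv => ⟨hpos v hv, hmax v hv⟩
    rw [pvBucketEqSorted (x :: t) (t.foldl max x) hb]
    rw [pvBucket, pvFoldlFlatMap]
    refine congrArg Prod.snd (PySem.List.foldl_congr_mem _ _ _ _ ?_)
    intro acc v _
    rw [pvInnerLoop ((PySem.Dict.counter (x :: t)).getD v 0) v
      (fun s i => if s.1 ≤ 0 then s else (s.1 - i, s.2 + 1)) acc,
      PySem.Dict.getD_counter]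
    simp
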